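-- pv_equiv track=rewrite | github.com/valayDave/algorithms | partition_equal_sets.py | shift_elements
-- ===== SOURCE A (Python) =====
-- from typing import List
--
-- def shift_elements(larger_sum_arr:List[int],smaller_sum_arr:List[int],shift_counter:int):
--     larger_sum_arr.sort()
--     if larger_sum_arr[0]+sum(smaller_sum_arr) < sum(larger_sum_arr) :
--         shifting_number = larger_sum_arr.pop(0)
--         smaller_sum_arr+=[shifting_number]
--         shift_counter+=1
--         return shift_elements(larger_sum_arr,smaller_sum_arr,shift_counter)
--     else:
--         return larger_sum_arr,smaller_sum_arr,shift_counter
-- ===== SOURCE B (Python) =====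
-- def shift_elements(larger_sum_arr, smaller_sum_arr, shift_counter):
--     larger_sum_arr.sort()
--     small_sum = sum(smaller_sum_arr)
--     large_sum = sum(larger_sum_arr)
--     i = 0
--     for x in larger_sum_arr:
--         if x + small_sum >= large_sum:
--             break
--         small_sum += x
--         large_sum -= x
--         i += 1
--     return larger_sum_arr[i:], smaller_sum_arr + larger_sum_arr[:i], shift_counter + i
-- ===== Notes on version B (the rewrite author's own statement) =====
-- stated objective: alternative
-- what changed: B replaces A's recursive re-sort-and-re-sum-per-pop with a single sort followed by one pass that maintains running sums and slices once at the end.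
import Mathlib
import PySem

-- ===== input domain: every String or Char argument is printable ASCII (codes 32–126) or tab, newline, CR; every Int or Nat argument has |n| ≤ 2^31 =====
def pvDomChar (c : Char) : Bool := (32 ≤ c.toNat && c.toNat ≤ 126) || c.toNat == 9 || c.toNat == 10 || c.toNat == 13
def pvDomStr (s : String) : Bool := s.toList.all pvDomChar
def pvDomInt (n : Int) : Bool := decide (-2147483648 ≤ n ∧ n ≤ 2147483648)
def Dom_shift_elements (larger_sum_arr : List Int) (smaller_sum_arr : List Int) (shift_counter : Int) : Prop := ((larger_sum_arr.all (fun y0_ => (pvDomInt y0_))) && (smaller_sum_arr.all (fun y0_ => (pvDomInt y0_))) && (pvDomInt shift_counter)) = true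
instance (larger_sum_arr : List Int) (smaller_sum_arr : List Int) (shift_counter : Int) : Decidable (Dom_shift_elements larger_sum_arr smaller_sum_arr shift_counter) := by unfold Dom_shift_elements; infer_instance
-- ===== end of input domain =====

-- B sorts once and keeps running sums in a single pass instead of A's re-sort + re-sum on every
-- recursive pop (objective: alternative). A mutates its list arguments in place (sort/pop/extend);
-- the equivalence proved here is about the RETURN value only.

-- ===== PORT A =====
def shift_elements (larger_sum_arr : List Int) (smaller_sum_arr : List Int) (shift_counter : Int) : List Int × List Int × Int :=
  match h : PySem.List.sorted larger_sum_arr (fun x => x) false with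
  | [] => ([], smaller_sum_arr, shift_counter)  -- Python raises IndexError at larger_sum_arr[0]; excluded by Pre_
  | x :: rest =>
    if x + smaller_sum_arr.sum < (x :: rest).sum then
      shift_elements rest (smaller_sum_arr ++ [x]) (shift_counter + 1)
    else (x :: rest, smaller_sum_arr, shift_counter)
termination_by larger_sum_arr.length
decreasing_by
  have hl := PySem.List.length_sorted (xs := larger_sum_arr) (key := fun x : Int => x) (rev := false)
  rw [h] at hl
  simp at hl
  omega

-- ===== PORT B =====
-- the for-loop of Source B: number of leading elements moved, with running small/large sums
def altShiftCount (xs : List Int) (smallSum largeSum : Int) : Nat :=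
  match xs with
  | [] => 0
  | x :: rest =>
    if x + smallSum ≥ largeSum then 0
    else 1 + altShiftCount rest (smallSum + x) (largeSum - x)

def shift_elements_alt (larger_sum_arr : List Int) (smaller_sum_arr : List Int) (shift_counter : Int) : List Int × List Int × Int :=
  let t := PySem.List.sorted larger_sum_arr (fun x => x) false
  let i := altShiftCount t smaller_sum_arr.sum t.sum
  -- larger[i:], larger[:i] with 0 ≤ i ≤ len are exactly drop i / take i
  (t.drop i, smaller_sum_arr ++ t.take i, shift_counter + (i : Int))

-- ===== PRECONDITION & SPEC =====
-- Pre_ excludes exactly the inputs where A raises IndexError: the larger list is empty or the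
-- shifting process consumes every element (at every index the moving condition still holds).
def Pre_shift_elements (larger_sum_arr : List Int) (smaller_sum_arr : List Int) (shift_counter : Int) : Prop :=
  ∃ i < (PySem.List.sorted larger_sum_arr (fun x => x) false).length,
    ¬ ((PySem.List.sorted larger_sum_arr (fun x => x) false).getD i 0
        + (smaller_sum_arr.sum + ((PySem.List.sorted larger_sum_arr (fun x => x) false).take i).sum)
      < (PySem.List.sorted larger_sum_arr (fun x => x) false).sum
        - ((PySem.List.sorted larger_sum_arr (fun x => x) false).take i).sum)
instance (larger_sum_arr : List Int) (smaller_sum_arr : List Int) (shift_counter : Int) : Decidable (Pre_shift_elements larger_sum_arr smaller_sum_arr shift_counter) := by unfold Pre_shift_elements; infer_instance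

def pvWitness_shift_elements : List Int × List Int × Int := ([2, 1], [3], 0)

def Spec_shift_elements (larger_sum_arr : List Int) (smaller_sum_arr : List Int) (shift_counter : Int) (out : List Int × List Int × Int) : Prop := out = shift_elements_alt larger_sum_arr smaller_sum_arr shift_counter
instance (larger_sum_arr : List Int) (smaller_sum_arr : List Int) (shift_counter : Int) (out : List Int × List Int × Int) : Decidable (Spec_shift_elements larger_sum_arr smaller_sum_arr shift_counter out) := by unfold Spec_shift_elements; infer_instance

-- ===== CLAIM (what is proved, stated in full; the proofs are below) =====
def Claim_equal_shift_elements : Prop := ∀ (larger_sum_arr : List Int) (smaller_sum_arr : List Int) (shift_counter : Int), Dom_shift_elements larger_sum_arr smaller_sum_arr shift_counter → Pre_shift_elements larger_sum_arr smaller_sum_arr shift_counter → Spec_shift_elements larger_sum_arr smaller_sum_arr shift_counter (shift_elements larger_sum_arr smaller_sum_arr shift_counter)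
-- ===== LEMMAS AND PROOFS =====

-- A on an already-sorted list equals B's single-pass result (no precondition needed:
-- the totalized ports agree even where Python A would raise).
lemma shift_elements_sorted_eq : ∀ (n : Nat) (t s : List Int) (c : Int),
    t.length = n → PySem.List.sorted t (fun x => x) false = t →
    shift_elements t s c =
      (t.drop (altShiftCount t s.sum t.sum), s ++ t.take (altShiftCount t s.sum t.sum),
        c + (altShiftCount t s.sum t.sum : Int)) := by
  intro n
  induction n with
  | zero =>
    intro t s c hlen hsorted
    have ht : t = [] := List.length_eq_zero_iff.mp hlen
    subst ht
    rw [shift_elements]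
    simp [altShiftCount, PySem.List.sorted]
  | succ n ih =>
    intro t s c hlen hsorted
    match t with
    | [] => simp at hlen
    | x :: rest =>
      have hpw : (x :: rest).Pairwise (fun a b : Int => a ≤ b) := by
        have := PySem.List.sorted_pairwise (xs := x :: rest) (key := fun y : Int => y)
        rwa [hsorted] at this
      have hrest : PySem.List.sorted rest (fun x => x) false = rest :=
        PySem.List.sorted_eq_self_of_pairwise (xs := rest) (fun x => x)
          (List.Pairwise.sublist (List.sublist_cons_self x rest) hpw)
      rw [shift_elements]
      rw [hsorted]
      show (if x + s.sum < (x :: rest).sum then shift_elements rest (s ++ [x]) (c + 1)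
            else (x :: rest, s, c)) = _
      have hk : altShiftCount rest (s.sum + x) ((x :: rest).sum - x)
          = altShiftCount rest ((s ++ [x]).sum) rest.sum := by
        simp [List.sum_cons, List.sum_append]
      by_cases hc : x + s.sum < (x :: rest).sum
      · rw [if_pos hc]
        rw [ih rest (s ++ [x]) (c + 1) (by simpa using hlen) hrest]
        have ha : altShiftCount (x :: rest) s.sum (x :: rest).sum
            = 1 + altShiftCount rest ((s ++ [x]).sum) rest.sum := by
          rw [altShiftCount, if_neg (by omega), hk]
        rw [ha]
        refine Prod.ext ?_ (Prod.ext ?_ ?_)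
        · simp [Nat.add_comm 1]
        · simp [Nat.add_comm 1, List.take_succ_cons]
        · push_cast
          ring
      · rw [if_neg hc]
        have ha : altShiftCount (x :: rest) s.sum (x :: rest).sum = 0 := by
          rw [altShiftCount, if_pos (by omega)]
        rw [ha]
        simp

theorem shift_elements_eq_alt (l s : List Int) (c : Int) :
    shift_elements l s c = shift_elements_alt l s c := by
  have hst : PySem.List.sorted (PySem.List.sorted l (fun x => x) false) (fun x => x) false
      = PySem.List.sorted l (fun x => x) false :=
    PySem.List.sorted_sorted (xs := l) (key := fun x : Int => x)
  have h1 : shift_elements l s c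
      = shift_elements (PySem.List.sorted l (fun x => x) false) s c := by
    conv_lhs => rw [shift_elements]
    conv_rhs => rw [shift_elements]
    rw [hst]
  rw [h1, shift_elements_sorted_eq _ _ s c rfl hst]
  rfl

-- ===== VERDICT (by name: the statement is the Claim_ definition above) =====
theorem shift_elements_spec : Claim_equal_shift_elements := by
  intro l s c _ _
  unfold Spec_shift_elements
  exact shift_elements_eq_alt l s c
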